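-- pv_equiv track=rewrite | github.com/youyue271/auto_pcap | TrafficAnalyzer/utils/artifact_utils.py | normalize_artifact_relative_path
-- ===== SOURCE A (Python) =====
-- def normalize_artifact_relative_path(raw_path: str) -> str:
--     text = str(raw_path or "").replace("\\", "/").strip()
--     if not text:
--         raise ValueError("artifact path is empty")
--
--     parts: list[str] = []
--     for part in text.split("/"):
--         part = part.strip()
--         if not part or part == ".":
--             continue
--         if part == "..":
--             raise ValueError("artifact path traversal is not allowed")
--         parts.append(part)
--
--     if not parts:
--         raise ValueError("artifact path is empty")
--     return "/".join(parts)
-- ===== SOURCE B (Python) =====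
-- def normalize_artifact_relative_path(raw_path: str) -> str:
--     # Single character-level scan: split on '/' and '\' directly (no replace/strip
--     # pre-passes), then validate and filter the stripped segments in their own passes.
--     segments = []
--     cur = []
--     for ch in str(raw_path or ""):
--         if ch == "/" or ch == "\\":
--             segments.append("".join(cur))
--             cur = []
--         else:
--             cur.append(ch)
--     segments.append("".join(cur))
--     stripped = [s.strip() for s in segments]
--     if any(s == ".." for s in stripped):
--         raise ValueError("artifact path traversal is not allowed")
--     parts = [s for s in stripped if s and s != "."]
--     if not parts:
--         raise ValueError("artifact path is empty")
--     return "/".join(parts)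
-- ===== Notes on version B (the rewrite author's own statement) =====
-- stated objective: alternative
-- what changed: B replaces A's replace-backslashes/strip/split string pre-passes with a single character-level scan that splits on both separators directly, then validates traversal and filters trivial segments in separate passes over the stripped segments.
-- outside the precondition, e.g. on normalize_artifact_relative_path('..'): A raises ValueError, B raises ValueError; on normalize_artifact_relative_path(''): A raises ValueError, B raises ValueError; on normalize_artifact_relative_path('.'): A raises ValueError, B raises ValueError
import Mathlib
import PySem

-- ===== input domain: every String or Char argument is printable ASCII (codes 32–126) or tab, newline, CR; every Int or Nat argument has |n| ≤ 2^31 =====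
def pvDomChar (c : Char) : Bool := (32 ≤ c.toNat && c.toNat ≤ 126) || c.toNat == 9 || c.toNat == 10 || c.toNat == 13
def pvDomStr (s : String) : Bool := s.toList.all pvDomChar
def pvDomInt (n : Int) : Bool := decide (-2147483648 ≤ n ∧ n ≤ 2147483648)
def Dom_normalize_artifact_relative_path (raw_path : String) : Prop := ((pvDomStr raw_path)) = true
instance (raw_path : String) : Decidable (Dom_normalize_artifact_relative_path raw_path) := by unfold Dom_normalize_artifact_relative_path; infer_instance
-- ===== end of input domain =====

-- B replaces A's replace-backslashes/strip/split pre-passes by one character-level scan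
-- that splits on both separators directly (alternative decomposition, same cost).
-- On inputs where the Python A raises ValueError, both ports return "" (excluded by Pre_).

-- ===== PORT A =====
-- A's loop over text.split("/"): strip each part, skip ''/'.', none = the '..' raise.
def pvAParts : List (List Char) → Option (List (List Char))
  | [] => some []
  | p :: rest =>
    let q := PySem.Chars.strip p
    if q = [] ∨ q = ['.'] then pvAParts rest
    else if q = ['.', '.'] then none
    else (pvAParts rest).map (q :: ·)

def normalize_artifact_relative_path (raw_path : String) : String :=
  let text := PySem.Chars.strip (PySem.Chars.replace raw_path.toList ['\\'] ['/'])
  if text = [] then ""        -- Python: raise ValueError("artifact path is empty")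
  else
    match pvAParts (PySem.Chars.splitOn text ['/']) with
    | none => ""              -- Python: raise ValueError("artifact path traversal is not allowed")
    | some parts =>
      if parts = [] then ""   -- Python: raise ValueError("artifact path is empty")
      else String.ofList (PySem.Chars.join ['/'] parts)

-- ===== PORT B =====
-- B's character scan: flush the current segment at '/' or '\'.
def pvBSegments : List Char → List Char → List (List Char)
  | [], cur => [cur.reverse]
  | c :: rest, cur =>
    if c = '/' ∨ c = '\\' then cur.reverse :: pvBSegments rest []
    else pvBSegments rest (c :: cur)

def normalize_artifact_relative_path_alt (raw_path : String) : String :=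
  let stripped := (pvBSegments raw_path.toList []).map PySem.Chars.strip
  if stripped.any (· == ['.', '.']) then ""  -- Python: raise ValueError("artifact path traversal is not allowed")
  else
    let parts := stripped.filter (fun s => !(s == []) && !(s == ['.']))
    if parts = [] then ""                    -- Python: raise ValueError("artifact path is empty")
    else String.ofList (PySem.Chars.join ['/'] parts)

-- ===== PRECONDITION & SPEC =====
-- Pre_ admits exactly the inputs on which the Python A returns: no path segment strips
-- to ".." (A raises "traversal not allowed") and some segment strips to a part other
-- than '' and '.' (otherwise A raises "artifact path is empty").
def Pre_normalize_artifact_relative_path (raw_path : String) : Prop :=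
  let segs := (PySem.Chars.splitOn (PySem.Chars.replace raw_path.toList ['\\'] ['/']) ['/']).map PySem.Chars.strip
  ['.', '.'] ∉ segs ∧ ∃ p ∈ segs, p ≠ [] ∧ p ≠ ['.']
instance (raw_path : String) : Decidable (Pre_normalize_artifact_relative_path raw_path) := by
  unfold Pre_normalize_artifact_relative_path; infer_instance

def pvWitness_normalize_artifact_relative_path : String := "a/b"

def Spec_normalize_artifact_relative_path (raw_path : String) (out : String) : Prop := out = normalize_artifact_relative_path_alt raw_path
instance (raw_path : String) (out : String) : Decidable (Spec_normalize_artifact_relative_path raw_path out) := by unfold Spec_normalize_artifact_relative_path; infer_instance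

-- ===== CLAIM (what is proved, stated in full; the proofs are below) =====
def Claim_equal_normalize_artifact_relative_path : Prop := ∀ (raw_path : String), Dom_normalize_artifact_relative_path raw_path → Pre_normalize_artifact_relative_path raw_path → Spec_normalize_artifact_relative_path raw_path (normalize_artifact_relative_path raw_path)

-- ===== LEMMAS AND PROOFS =====

-- the '\' → '/' character replacement
def pvRepl (c : Char) : Char := if c = '\\' then '/' else c

-- plain structural split on '/'
def pvSplitSlash : List Char → List Char → List (List Char)
  | [], cur => [cur.reverse]
  | c :: rest, cur =>
    if c = '/' then cur.reverse :: pvSplitSlash rest []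
    else pvSplitSlash rest (c :: cur)

theorem pv_replace_go (fuel : Nat) : ∀ (l acc : List Char), l.length ≤ fuel →
    PySem.Chars.replace.go ['\\'] ['/'] fuel l acc = acc.reverse ++ l.map pvRepl := by
  induction fuel with
  | zero =>
    intro l acc h
    have : l = [] := by cases l <;> simp_all
    subst this; simp [PySem.Chars.replace.go]
  | succ n ih =>
    intro l acc h
    cases l with
    | nil => simp [PySem.Chars.replace.go]
    | cons c t =>
      simp only [PySem.Chars.replace.go]
      by_cases hc : c = '\\'
      · subst hc
        rw [if_pos (by simp [List.isPrefixOf])]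
        rw [ih _ _ (by simpa using Nat.le_of_succ_le_succ h)]
        simp [pvRepl]
      · rw [if_neg (by simp [List.isPrefixOf]; exact fun hh => hc hh.symm)]
        rw [ih _ _ (by simpa using Nat.le_of_succ_le_succ h)]
        simp [pvRepl, hc]

theorem pv_replace_eq (L : List Char) :
    PySem.Chars.replace L ['\\'] ['/'] = L.map pvRepl := by
  rw [PySem.Chars.replace]
  simp only [List.isEmpty_cons, if_false, Bool.false_eq_true]
  exact pv_replace_go L.length L [] (le_refl _)

theorem pv_splitOn_go (fuel : Nat) : ∀ (l cur : List Char) (acc : List (List Char)), l.length ≤ fuel →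
    PySem.Chars.splitOn.go ['/'] fuel l cur acc = acc.reverse ++ pvSplitSlash l cur := by
  induction fuel with
  | zero =>
    intro l cur acc h
    have : l = [] := by cases l <;> simp_all
    subst this; simp [PySem.Chars.splitOn.go, pvSplitSlash]
  | succ n ih =>
    intro l cur acc h
    cases l with
    | nil => simp [PySem.Chars.splitOn.go, pvSplitSlash]
    | cons c t =>
      simp only [PySem.Chars.splitOn.go]
      by_cases hc : c = '/'
      · subst hc
        rw [if_pos (by simp [List.isPrefixOf])]
        rw [ih _ _ _ (by simpa using Nat.le_of_succ_le_succ h)]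
        simp [pvSplitSlash]
      · rw [if_neg (by simp [List.isPrefixOf]; exact fun hh => hc hh.symm)]
        rw [ih _ _ _ (by simpa using Nat.le_of_succ_le_succ h)]
        simp [pvSplitSlash, hc]

theorem pv_splitOn_eq (M : List Char) :
    PySem.Chars.splitOn M ['/'] = pvSplitSlash M [] := by
  rw [PySem.Chars.splitOn]
  exact pv_splitOn_go (M.length + 1) M [] [] (by omega)

theorem pv_scan_eq (L : List Char) : ∀ cur, pvSplitSlash (L.map pvRepl) cur = pvBSegments L cur := by
  induction L with
  | nil => intro cur; simp [pvSplitSlash, pvBSegments]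
  | cons c t ih =>
    intro cur
    by_cases hc : c = '/' ∨ c = '\\'
    · have h1 : pvRepl c = '/' := by rcases hc with h | h <;> simp [pvRepl, h]
      simp [pvSplitSlash, pvBSegments, h1, hc, ih]
    · push Not at hc
      have h1 : pvRepl c = c := by simp [pvRepl, hc.2]
      simp [pvSplitSlash, pvBSegments, h1, hc.1, hc, ih]

theorem pv_split_noSlash (u : List Char) (hu : ∀ c ∈ u, c ≠ '/') : ∀ cur,
    pvSplitSlash u cur = [cur.reverse ++ u] := by
  induction u with
  | nil => intro cur; simp [pvSplitSlash]
  | cons c t ih =>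
    intro cur
    rw [pvSplitSlash, if_neg (hu c (by simp)), ih (fun d hd => hu d (by simp [hd]))]
    simp

-- the accumulator only prepends to the first segment
theorem pv_split_cur (M : List Char) : ∀ cur,
    pvSplitSlash M cur = (cur.reverse ++ (pvSplitSlash M []).headI) :: (pvSplitSlash M []).tail := by
  induction M with
  | nil => intro cur; simp [pvSplitSlash]
  | cons c t ih =>
    intro cur
    by_cases hc : c = '/'
    · simp [pvSplitSlash, hc]
    · rw [pvSplitSlash, if_neg hc, ih (c :: cur)]
      conv_rhs => rw [pvSplitSlash, if_neg hc, ih [c]]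
      simp

theorem pv_strip_ws_append (w x : List Char) (hw : ∀ c ∈ w, PySem.Chars.isspace c) :
    PySem.Chars.strip (w ++ x) = PySem.Chars.strip x := by
  have h1 : List.dropWhile PySem.Chars.isspace w = [] := List.dropWhile_eq_nil_iff.mpr hw
  simp [PySem.Chars.strip, PySem.Chars.lstrip, List.dropWhile_append, h1]

theorem pv_strip_append_ws (x v : List Char) (hv : ∀ c ∈ v, PySem.Chars.isspace c) :
    PySem.Chars.strip (x ++ v) = PySem.Chars.strip x := by
  have hv' : List.dropWhile PySem.Chars.isspace v = [] := List.dropWhile_eq_nil_iff.mpr hv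
  have hvr : List.dropWhile PySem.Chars.isspace v.reverse = [] :=
    List.dropWhile_eq_nil_iff.mpr (by simpa using hv)
  simp only [PySem.Chars.strip, PySem.Chars.lstrip, List.dropWhile_append]
  by_cases hx : List.dropWhile PySem.Chars.isspace x = []
  · simp [hx, hv', PySem.Chars.rstrip]
  · rw [if_neg (by simpa using hx)]
    simp only [PySem.Chars.rstrip, List.reverse_append, List.dropWhile_append, hvr]
    simp

theorem pv_ws_ne_slash {c : Char} (h : PySem.Chars.isspace c) : c ≠ '/' := by
  intro hc; subst hc; simp [PySem.Chars.isspace] at h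

theorem pv_split_strip_suffix (v : List Char) (hv : ∀ c ∈ v, PySem.Chars.isspace c) (M : List Char) : ∀ cur,
    (pvSplitSlash (M ++ v) cur).map PySem.Chars.strip = (pvSplitSlash M cur).map PySem.Chars.strip := by
  induction M with
  | nil =>
    intro cur
    rw [List.nil_append, pv_split_noSlash v (fun c hc => pv_ws_ne_slash (hv c hc)) cur]
    simp [pvSplitSlash]
    rw [pv_strip_append_ws _ v hv]
  | cons c t ih =>
    intro cur
    by_cases hc : c = '/'
    · simp only [List.cons_append, pvSplitSlash, if_pos hc, List.map_cons, ih]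
    · simp only [List.cons_append, pvSplitSlash, if_neg hc, ih]

theorem pv_split_strip_prefix (w : List Char) (hw : ∀ c ∈ w, PySem.Chars.isspace c) (M : List Char) :
    (pvSplitSlash (w ++ M) []).map PySem.Chars.strip = (pvSplitSlash M []).map PySem.Chars.strip := by
  induction w with
  | nil => simp
  | cons c t ih =>
    have hc : c ≠ '/' := pv_ws_ne_slash (hw c (by simp))
    have ih' := ih (fun d hd => hw d (by simp [hd]))
    have hbase := pv_split_cur (t ++ M) []
    simp only [List.reverse_nil, List.nil_append] at hbase
    rw [List.cons_append, pvSplitSlash, if_neg hc, pv_split_cur (t ++ M) [c]]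
    rw [hbase] at ih'
    simp only [List.map_cons] at ih' ⊢
    rw [← ih']
    congr 1
    exact pv_strip_ws_append [c] _ (fun d hd => by simp at hd; subst hd; exact hw _ (by simp))

-- stripping the whole text does not change the stripped segments
theorem pv_split_strip (M : List Char) :
    (pvSplitSlash (PySem.Chars.strip M) []).map PySem.Chars.strip = (pvSplitSlash M []).map PySem.Chars.strip := by
  have hM : M = List.takeWhile PySem.Chars.isspace M ++ PySem.Chars.lstrip M := by
    simp [PySem.Chars.lstrip]
  have hy : PySem.Chars.lstrip M =
      PySem.Chars.strip M ++ (List.takeWhile PySem.Chars.isspace (PySem.Chars.lstrip M).reverse).reverse := by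
    have h := congrArg List.reverse
      (List.takeWhile_append_dropWhile (p := PySem.Chars.isspace) (l := (PySem.Chars.lstrip M).reverse))
    simp only [List.reverse_append, List.reverse_reverse] at h
    simp only [PySem.Chars.strip, PySem.Chars.rstrip]
    exact h.symm
  calc (pvSplitSlash (PySem.Chars.strip M) []).map PySem.Chars.strip
      = (pvSplitSlash (PySem.Chars.strip M ++ (List.takeWhile PySem.Chars.isspace (PySem.Chars.lstrip M).reverse).reverse) []).map PySem.Chars.strip := by
        rw [pv_split_strip_suffix _ (fun c hc => List.mem_takeWhile_imp (by simpa using hc)) _ []]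
    _ = (pvSplitSlash (PySem.Chars.lstrip M) []).map PySem.Chars.strip := by rw [← hy]
    _ = (pvSplitSlash (List.takeWhile PySem.Chars.isspace M ++ PySem.Chars.lstrip M) []).map PySem.Chars.strip := by
        rw [pv_split_strip_prefix _ (fun c hc => List.mem_takeWhile_imp hc) _]
    _ = (pvSplitSlash M []).map PySem.Chars.strip := by rw [← hM]

-- characterisation of A's loop
theorem pv_aparts (xs : List (List Char)) :
    pvAParts xs = if ['.', '.'] ∈ xs.map PySem.Chars.strip then none
      else some ((xs.map PySem.Chars.strip).filter (fun s => !(s == []) && !(s == ['.']))) := by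
  induction xs with
  | nil => simp [pvAParts]
  | cons p rest ih =>
    simp only [pvAParts, List.map_cons, List.filter_cons, List.mem_cons]
    by_cases h1 : PySem.Chars.strip p = [] ∨ PySem.Chars.strip p = ['.']
    · rw [if_pos h1, ih]
      have hne : ¬ (['.', '.'] = PySem.Chars.strip p) := by
        rcases h1 with h | h <;> simp [h]
      have hf : (!(PySem.Chars.strip p == []) && !(PySem.Chars.strip p == ['.'])) = false := by
        rcases h1 with h | h <;> simp [h]
      by_cases h2 : ['.', '.'] ∈ List.map PySem.Chars.strip rest
      · rw [if_pos h2, if_pos (Or.inr h2)]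
      · rw [if_neg h2, if_neg (by rintro (h | h); exact hne h; exact h2 h), hf]
        simp
    · rw [if_neg h1]
      push Not at h1
      by_cases h2 : PySem.Chars.strip p = ['.', '.']
      · rw [if_pos h2, if_pos (Or.inl h2.symm)]
      · rw [if_neg h2, ih]
        have hf : (!(PySem.Chars.strip p == []) && !(PySem.Chars.strip p == ['.'])) = true := by
          simp [h1.1, h1.2]
        by_cases h3 : ['.', '.'] ∈ List.map PySem.Chars.strip rest
        · rw [if_pos h3, if_pos (Or.inr h3)]; rfl
        · rw [if_neg h3, if_neg (by rintro (h | h); exact h2 h.symm; exact h3 h), hf]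
          simp

-- ===== VERDICT (by name: the statement is the Claim_ definition above) =====
theorem normalize_artifact_relative_path_spec : Claim_equal_normalize_artifact_relative_path := by
  intro raw_path _ hpre
  unfold Spec_normalize_artifact_relative_path
  unfold Pre_normalize_artifact_relative_path at hpre
  set L := raw_path.toList with hL
  -- both pipelines produce the same list of stripped segments
  have hrep : PySem.Chars.replace L ['\\'] ['/'] = L.map pvRepl := pv_replace_eq L
  have hsegsB : pvSplitSlash (L.map pvRepl) [] = pvBSegments L [] := pv_scan_eq L []
  have hsegs :
      (pvSplitSlash (PySem.Chars.strip (PySem.Chars.replace L ['\\'] ['/'])) []).map PySem.Chars.strip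
        = (pvBSegments L []).map PySem.Chars.strip := by
    rw [pv_split_strip, hrep, hsegsB]
  have hpre' : ['.', '.'] ∉ (pvBSegments L []).map PySem.Chars.strip ∧
      ∃ p ∈ (pvBSegments L []).map PySem.Chars.strip, p ≠ [] ∧ p ≠ ['.'] := by
    rw [pv_splitOn_eq, hrep, hsegsB] at hpre
    exact hpre
  obtain ⟨hnotrav, p, hp, hp1, hp2⟩ := hpre'
  unfold normalize_artifact_relative_path normalize_artifact_relative_path_alt
  simp only [← hL]
  -- A's text is nonempty under Pre_
  have htext : PySem.Chars.strip (PySem.Chars.replace L ['\\'] ['/']) ≠ [] := by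
    intro h0
    rw [h0] at hsegs
    simp [pvSplitSlash] at hsegs
    rw [← hsegs] at hp
    simp at hp
    exact hp1 hp
  rw [if_neg htext, pv_splitOn_eq, pv_aparts, if_neg (hsegs ▸ hnotrav), hsegs]
  -- B takes its non-traversal branch
  have hanyB : ((pvBSegments L []).map PySem.Chars.strip).any (· == ['.', '.']) = false := by
    simp only [List.any_eq_false]
    intro x hx
    have hxne : x ≠ ['.', '.'] := fun he => hnotrav (he ▸ hx)
    simp [hxne]
  -- the filtered parts list is nonempty
  have hparts : ((pvBSegments L []).map PySem.Chars.strip).filter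
      (fun s => !(s == []) && !(s == ['.'])) ≠ [] := by
    intro h0
    have : p ∈ ((pvBSegments L []).map PySem.Chars.strip).filter
        (fun s => !(s == []) && !(s == ['.'])) := by
      rw [List.mem_filter]
      exact ⟨hp, by simp [hp1, hp2]⟩
    rw [h0] at this
    simp at this
  rw [hanyB]
  simp only [Bool.false_eq_true, if_false, if_neg hparts]
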